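-- pv_equiv track=rewrite | github.com/andras-bodi-mate/SapphireFileServer | backend/src/server.py | getAlteredName
-- ===== SOURCE A (Python) =====
-- def getAlteredName(originalName: str):
--     defaultAlteredName = f"{originalName} (1)"
--
--     if len(originalName) < 3:
--         return defaultAlteredName
--
--     if originalName[-1:] != ')':
--         return defaultAlteredName
--
--     previousIndexStart = -1
--     for i, c in enumerate(reversed(originalName[:-1])):
--         if c.isnumeric():
--             previousIndexStart = len(originalName) - 2 - i
--         else:
--             break
--
--     if previousIndexStart == -1:
--         return defaultAlteredName
--
--     if previousIndexStart != 0 and originalName[previousIndexStart - 1] != '(':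
--         return defaultAlteredName
--
--     newIndex = int(originalName[previousIndexStart : -1]) + 1
--     return f"{originalName[:previousIndexStart]}{newIndex})"
-- ===== SOURCE B (Python) =====
-- def getAlteredName(originalName: str):
--     default = f"{originalName} (1)"
--     if len(originalName) < 3 or not originalName.endswith(')'):
--         return default
--     body = originalName[:-1]
--     p = body.rfind('(')
--     tail = body[p + 1:]          # p == -1 gives body[0:], i.e. the whole body
--     if not tail.isdigit():
--         return default
--     newIndex = int(tail) + 1
--     if p == -1:
--         return f"{newIndex})"
--     return f"{body[:p]}({newIndex})"
-- ===== Notes on version B (the rewrite author's own statement) =====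
-- stated objective: idiomatic
-- what changed: Instead of A's reverse character-by-character digit scan with enumerate/index arithmetic, B locates the last opening parenthesis with rfind, takes the slice after it and validates it with a single isdigit test, rebuilding the name from that split.
import Mathlib
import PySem

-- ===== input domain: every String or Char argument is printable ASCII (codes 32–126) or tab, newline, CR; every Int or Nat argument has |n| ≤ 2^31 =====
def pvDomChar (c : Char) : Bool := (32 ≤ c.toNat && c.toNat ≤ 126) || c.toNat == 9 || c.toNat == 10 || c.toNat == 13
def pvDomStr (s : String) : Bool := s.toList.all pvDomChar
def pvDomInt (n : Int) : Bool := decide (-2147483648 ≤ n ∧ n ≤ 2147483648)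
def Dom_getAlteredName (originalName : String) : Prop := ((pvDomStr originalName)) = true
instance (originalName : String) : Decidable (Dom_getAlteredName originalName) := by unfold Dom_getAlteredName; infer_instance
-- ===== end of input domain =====

-- B locates the last '(' with rfind and validates the remainder with isdigit, instead of
-- A's reverse digit-run scan with index arithmetic; objective: idiomatic.

-- ===== PORT A =====
-- A's loop 'for i, c in enumerate(reversed(originalName[:-1])): …' as structural recursion
def pvALoop (n : Nat) : List Char → Nat → Int → Int
  | [], _, prev => prev
  | c :: rest, i, prev =>
    if PySem.Chars.isdigit c then  -- c.isnumeric(): exact on the ASCII input domain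
      pvALoop n rest (i + 1) ((n : Int) - 2 - (i : Int))
    else prev

def getAlteredName (originalName : String) : String :=
  let s := originalName.toList
  let defaultAlteredName := s ++ " (1)".toList   -- f"{originalName} (1)"
  if s.length < 3 then String.ofList defaultAlteredName
  else if PySem.List.slice s (some (-1)) none ≠ [')'] then String.ofList defaultAlteredName
  else
    let previousIndexStart := pvALoop s.length ((PySem.List.slice s none (some (-1))).reverse) 0 (-1)
    if previousIndexStart = -1 then String.ofList defaultAlteredName
    else if previousIndexStart ≠ 0 ∧ PySem.List.pyGet? s (previousIndexStart - 1) ≠ some '(' then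
      String.ofList defaultAlteredName
    else
      -- int(originalName[previousIndexStart:-1]) cannot raise here: a nonempty digit run
      let newIndex := (PySem.Int.ofChars? (PySem.List.slice s (some previousIndexStart) (some (-1)))).getD 0 + 1
      String.ofList (PySem.List.slice s none (some previousIndexStart) ++ PySem.Int.toChars newIndex ++ [')'])

-- ===== PORT B =====
def getAlteredName_alt (originalName : String) : String :=
  let s := originalName.toList
  let dflt := s ++ " (1)".toList                    -- f"{originalName} (1)"
  if s.length < 3 ∨ ¬ PySem.Chars.endswith s [')'] then String.ofList dflt
  else
    let body := PySem.List.slice s none (some (-1)) -- originalName[:-1]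
    let p := PySem.Chars.rfind body ['(']           -- body.rfind('(')
    let tail := PySem.List.slice body (some (p + 1)) none   -- body[p+1:] (p = -1 gives body[0:])
    if ¬ PySem.Chars.strIsdigit tail then String.ofList dflt
    else
      -- int(tail) cannot raise here: tail.isdigit() holds
      let newIndex := (PySem.Int.ofChars? tail).getD 0 + 1
      if p = -1 then String.ofList (PySem.Int.toChars newIndex ++ [')'])
      else String.ofList (PySem.List.slice body none (some p) ++ ['('] ++ PySem.Int.toChars newIndex ++ [')'])

-- ===== PRECONDITION & SPEC =====
def Spec_getAlteredName (originalName : String) (out : String) : Prop := out = getAlteredName_alt originalName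
instance (originalName : String) (out : String) : Decidable (Spec_getAlteredName originalName out) := by unfold Spec_getAlteredName; infer_instance

-- ===== CLAIM (what is proved, stated in full; the proofs are below) =====
def Claim_equal_getAlteredName : Prop := ∀ (originalName : String), Dom_getAlteredName originalName → Spec_getAlteredName originalName (getAlteredName originalName)

-- ===== LEMMAS AND PROOFS =====

-- closed form of A's scan: it returns -1 if the list starts with a non-digit, else
-- n - 2 - (index of the last digit of the leading digit run)
theorem pvALoop_eq (n : Nat) (l : List Char) (i : Nat) (prev : Int) :
    pvALoop n l i prev =
      if (l.takeWhile PySem.Chars.isdigit) = [] then prev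
      else (n : Int) - 2 - ((i : Int) + ((l.takeWhile PySem.Chars.isdigit).length : Int) - 1) := by
  induction l generalizing i prev with
  | nil => simp [pvALoop]
  | cons c rest ih =>
    by_cases hc : PySem.Chars.isdigit c
    · rw [pvALoop, if_pos hc, ih, List.takeWhile_cons_of_pos hc]
      by_cases ht : rest.takeWhile PySem.Chars.isdigit = []
      · simp [ht]
      · simp only [ht, List.length_cons]
        have : (rest.takeWhile PySem.Chars.isdigit).length ≠ 0 := by
          simpa [List.length_eq_zero_iff] using ht
        simp only [List.cons_ne_nil, if_neg, not_false_iff]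
        push_cast
        ring
    · rw [pvALoop, if_neg hc, List.takeWhile_cons_of_neg hc, if_pos rfl]

theorem isPrefixOf_singleton_iff (c : Char) (l : List Char) :
    [c].isPrefixOf l = true ↔ l.head? = some c := by
  cases l with
  | nil => simp [List.isPrefixOf]
  | cons a as => simpa [List.isPrefixOf] using eq_comm

theorem rfind_go_succ (s sub : List Char) (j : Nat) :
    PySem.Chars.rfind.go s sub (j + 1) =
      if sub.isPrefixOf (s.drop (j + 1)) then ((j + 1 : Nat) : Int)
      else PySem.Chars.rfind.go s sub j := by
  simp [PySem.Chars.rfind.go]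

theorem rfind_go_zero (s sub : List Char) :
    PySem.Chars.rfind.go s sub 0 = if sub.isPrefixOf s then 0 else -1 := by
  simp [PySem.Chars.rfind.go]

theorem rfind_go_not_mem (s : List Char) (c : Char) (h : c ∉ s) (j : Nat) :
    PySem.Chars.rfind.go s [c] j = -1 := by
  induction j with
  | zero =>
    rw [rfind_go_zero, if_neg]
    intro hp
    exact h (List.mem_of_mem_head? ((isPrefixOf_singleton_iff c s).mp hp))
  | succ j ih =>
    rw [rfind_go_succ, ih, if_neg]
    intro hp
    exact h (List.mem_of_mem_drop (List.mem_of_mem_head? ((isPrefixOf_singleton_iff c _).mp hp)))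

theorem rfind_go_last (v u : List Char) (c : Char) (h : c ∉ u) (m : Nat) :
    PySem.Chars.rfind.go (v ++ c :: u) [c] (v.length + m) = (v.length : Int) := by
  induction m with
  | zero =>
    rw [Nat.add_zero]
    cases v with
    | nil =>
      rw [List.nil_append, List.length_nil, rfind_go_zero,
          if_pos ((isPrefixOf_singleton_iff c _).mpr (by simp))]
      simp
    | cons a as =>
      have hp : ([c] : List Char).isPrefixOf (((a :: as) ++ c :: u).drop (as.length + 1)) = true := by
        rw [isPrefixOf_singleton_iff, List.head?_drop,
            show (a :: as : List Char) ++ c :: u = ((a :: as) ++ [c]) ++ u from by simp,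
            List.getElem?_append_left (by simp),
            show as.length + 1 = (a :: as).length from by simp,
            List.getElem?_concat_length]
      rw [List.length_cons, rfind_go_succ, if_pos hp]
  | succ m ih =>
    rw [← Nat.add_assoc, rfind_go_succ, ih, if_neg]
    rw [isPrefixOf_singleton_iff, List.head?_drop]
    intro hc
    apply h
    rw [List.getElem?_append_right (by omega),
        show v.length + m + 1 - v.length = m + 1 from by omega] at hc
    simp only [List.getElem?_cons_succ] at hc
    exact List.mem_of_getElem? hc

-- rfind of a single character: -1 when absent, index of the LAST occurrence otherwise
theorem rfind_not_mem (s : List Char) (c : Char) (h : c ∉ s) :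
    PySem.Chars.rfind s [c] = -1 := by
  rw [PySem.Chars.rfind]; exact rfind_go_not_mem s c h _

theorem rfind_last (v u : List Char) (c : Char) (h : c ∉ u) :
    PySem.Chars.rfind (v ++ c :: u) [c] = (v.length : Int) := by
  rw [PySem.Chars.rfind, show (v ++ c :: u).length = v.length + (u.length + 1) from by simp]
  exact rfind_go_last v u c h _

-- the first element dropWhile keeps fails the predicate
theorem pvHeadDropWhileFalse {α : Type} {p : α → Bool} {a : α} {as : List α} :
    ∀ (l : List α), l.dropWhile p = a :: as → p a = false := by
  intro l
  induction l with
  | nil => intro h; simp at h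
  | cons x xs ih =>
    intro h
    by_cases hx : p x
    · rw [List.dropWhile_cons_of_pos hx] at h
      exact ih h
    · rw [List.dropWhile_cons_of_neg hx] at h
      cases h
      simpa using hx

theorem suffix_singleton_iff (c : Char) (l : List Char) :
    [c] <:+ l ↔ l.getLast? = some c := by
  constructor
  · rintro ⟨t, rfl⟩; simp
  · intro h
    cases l with
    | nil => simp at h
    | cons a as =>
      exact ⟨(a :: as).dropLast, List.dropLast_append_getLast? c h⟩

theorem slice_natCast_neg_one (l : List Char) (m : Nat) (h : m < l.length) :
    PySem.List.slice l (some (m : Int)) (some (-1)) = l.dropLast.drop m := by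
  simp [PySem.List.slice, List.dropLast_eq_take, List.drop_take, min_eq_left h.le]

theorem getAlteredName_eq_alt (originalName : String) :
    getAlteredName originalName = getAlteredName_alt originalName := by
  simp only [getAlteredName, getAlteredName_alt]
  set s := originalName.toList with hs
  by_cases h3 : s.length < 3
  · rw [if_pos h3, if_pos (Or.inl h3)]
  · have h3' : 3 ≤ s.length := by omega
    have hne : s ≠ [] := by intro h; rw [h] at h3'; simp at h3'
    have hslast : PySem.List.slice s (some (-1)) none = [s.getLast hne] := by
      simp only [PySem.List.slice]
      norm_num
      rw [show s.length - (s.length - 1) = 1 from by omega, List.drop_length_sub_one hne]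
      simp
    by_cases hlast : s.getLast hne = ')'
    · -- the name ends with ')': A examines the trailing digit run of body := s[:-1],
      -- B the suffix of body after its last '('
      have hsplit : s.dropLast ++ [')'] = s := by
        rw [← hlast]; exact List.dropLast_concat_getLast hne
      have hend : PySem.Chars.endswith s [')'] = true :=
        (PySem.Chars.endswith_iff s [')']).mpr ((suffix_singleton_iff ')' s).mpr
          (by rw [List.getLast?_eq_some_getLast hne, hlast]))
      rw [if_neg h3, if_neg (by rw [hslast, hlast]; simp),
          if_neg (show ¬(s.length < 3 ∨ ¬PySem.Chars.endswith s [')'] = true) from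
            fun hcon => hcon.elim h3 (fun h2 => h2 hend)),
          PySem.List.slice_to_neg_one, pvALoop_eq]
      set body := s.dropLast with hbody
      set t := body.reverse.takeWhile PySem.Chars.isdigit with htw
      set d := body.reverse.dropWhile PySem.Chars.isdigit with hdw
      have htd : t ++ d = body.reverse := List.takeWhile_append_dropWhile
      have hbody2 : body = d.reverse ++ t.reverse := by
        rw [← List.reverse_append, htd, List.reverse_reverse]
      have hlen : t.length + d.length = s.length - 1 := by
        have h := congrArg List.length htd
        simp only [List.length_append, List.length_reverse] at h
        rw [h, hbody]
        simp
      have hs2 : s = d.reverse ++ (t.reverse ++ [')']) := by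
        rw [← hsplit, hbody2, List.append_assoc]
      have hdigits : ∀ x ∈ t, PySem.Chars.isdigit x := fun x hx =>
        List.mem_takeWhile_imp (htw ▸ hx)
      -- the character A inspects just before the digit run is d's head
      have hget_head : d ≠ [] → PySem.List.pyGet? s (((d.length : Nat) : Int) - 1) = d.head? := by
        intro hd
        have h1 : 1 ≤ d.length := List.length_pos_iff.mpr hd
        rw [show (((d.length : Nat) : Int) - 1) = ((d.length - 1 : Nat) : Int) from by omega,
            PySem.List.pyGet?_natCast, hs2,
            List.getElem?_append_left (by simp; omega)]
        rw [← List.getLast?_reverse, List.getLast?_eq_getElem?, List.length_reverse]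
      -- generic form of A's two output slices (used by both success branches)
      have hApre : PySem.List.slice s none (some ((d.length : Nat) : Int)) = d.reverse := by
        rw [PySem.List.slice_to_natCast, hs2, List.take_left' (by simp)]
      by_cases hpar : '(' ∈ body
      · -- body = v ++ '(' :: u with '(' ∉ u: rfind finds v.length
        obtain ⟨u', hu'⟩ : ∃ u', body.reverse.takeWhile (fun x => x ≠ '(') = u' := ⟨_, rfl⟩
        obtain ⟨d', hd'⟩ : ∃ d', body.reverse.dropWhile (fun x => x ≠ '(') = d' := ⟨_, rfl⟩
        have hu'mem : ∀ x ∈ u', x ≠ '(' := by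
          intro x hx
          have hx' : x ∈ List.takeWhile (fun x => decide (x ≠ '(')) body.reverse :=
            hu'.symm ▸ hx
          exact of_decide_eq_true
            (List.mem_takeWhile_imp (p := fun y => decide (y ≠ '(')) hx')
        have hd'ne : d' ≠ [] := by
          intro hnil
          have hall := (List.dropWhile_eq_nil_iff).mp (hd'.trans hnil)
          have := hall '(' (List.mem_reverse.mpr hpar)
          simp at this
        rcases List.exists_cons_of_ne_nil hd'ne with ⟨a, as, ha⟩
        have ha' : a = '(' := by
          have := pvHeadDropWhileFalse body.reverse (hd'.trans ha)
          simpa using this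
        set v := as.reverse with hv
        set u := u'.reverse with hu
        have hbody3 : body = v ++ '(' :: u := by
          have heq := List.takeWhile_append_dropWhile
            (p := fun x => (x ≠ '(' : Bool)) (l := body.reverse)
          rw [hu', hd', ha, ha'] at heq
          have h2 := congrArg List.reverse heq
          rw [List.reverse_reverse] at h2
          rw [← h2, hu, hv]
          simp
        have hunp : '(' ∉ u := fun hx =>
          hu'mem '(' (by rw [hu] at hx; exact List.mem_reverse.mp hx) rfl
        have hrf : PySem.Chars.rfind body ['('] = (v.length : Int) := by
          rw [hbody3]; exact rfind_last v u '(' hunp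
        have htail : PySem.List.slice body (some (PySem.Chars.rfind body ['('] + 1)) none = u := by
          rw [hrf, show ((v.length : Int) + 1) = ((v.length + 1 : Nat) : Int) from by omega,
              PySem.List.slice_from_natCast, hbody3,
              show v ++ '(' :: u = (v ++ ['(']) ++ u from by simp, List.drop_left' (by simp)]
        have hrev : body.reverse = u.reverse ++ '(' :: v.reverse := by rw [hbody3]; simp
        rw [htail]
        by_cases hu_dig : PySem.Chars.strIsdigit u = true
        · -- success in both: the run is exactly u, preceded by '('
          have hu_ne : u ≠ [] := by
            intro h; rw [h] at hu_dig; simp [PySem.Chars.strIsdigit] at hu_dig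
          have hu_all : ∀ x ∈ u, PySem.Chars.isdigit x := by
            intro x hx
            simp only [PySem.Chars.strIsdigit, Bool.and_eq_true, List.all_eq_true] at hu_dig
            exact hu_dig.2 x hx
          have ht_eq : t = u.reverse := by
            rw [htw, hrev, List.takeWhile_append,
                if_pos (by
                  rw [List.takeWhile_eq_self_iff.mpr
                    (fun x hx => hu_all x (List.mem_reverse.mp hx))]),
                List.takeWhile_cons_of_neg (by simp [PySem.Chars.isdigit])]
            simp
          have hd_eq : d = '(' :: v.reverse := by
            rw [hdw, hrev, List.dropWhile_append,
                if_pos (by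
                  rw [List.dropWhile_eq_nil_iff.mpr
                    (fun x hx => hu_all x (List.mem_reverse.mp hx))]; rfl),
                List.dropWhile_cons_of_neg (by simp [PySem.Chars.isdigit])]
          have ht_ne : t ≠ [] := by rw [ht_eq]; simp [hu_ne]
          have hprev : (s.length : Int) - 2 - ((0 : Nat) + ((t.length : Nat) : Int) - 1)
              = ((d.length : Nat) : Int) := by
            have htl : 1 ≤ t.length := List.length_pos_iff.mpr ht_ne
            push_cast; omega
          rw [if_neg ht_ne, hprev,
              if_neg (show ¬(((d.length : Nat) : Int) = -1) from by omega),
              if_neg (show ¬(¬((d.length : Nat) : Int) = 0 ∧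
                  ¬PySem.List.pyGet? s (((d.length : Nat) : Int) - 1) = some '(') from by
                rw [hget_head (by rw [hd_eq]; simp), hd_eq]
                simp),
              if_neg (show ¬¬(PySem.Chars.strIsdigit u = true) from not_not_intro hu_dig),
              hrf,
              if_neg (show ¬(((v.length : Nat) : Int) = -1) from by omega)]
          have hAdig : PySem.List.slice s (some ((d.length : Nat) : Int)) (some (-1)) = u := by
            rw [slice_natCast_neg_one s d.length (by omega), ← hbody, hbody2,
                List.drop_left' (by simp), ht_eq, List.reverse_reverse]
          have hBpre : PySem.List.slice body none (some ((v.length : Nat) : Int)) = v := by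
            rw [PySem.List.slice_to_natCast, hbody3, List.take_left' rfl]
          rw [hApre, hAdig, hBpre, hd_eq]
          simp
        · -- B returns the default; A's paren check fails (or there is no run)
          rw [if_pos (show ¬(PySem.Chars.strIsdigit u = true) from hu_dig)]
          by_cases ht : t = []
          · rw [if_pos ht, if_pos rfl]
          · have hu_ne : u ≠ [] := by
              intro h
              rw [htw, hrev, h] at ht
              simp only [List.reverse_nil, List.nil_append] at ht
              exact ht (List.takeWhile_cons_of_neg (by simp [PySem.Chars.isdigit]))
            set w := u.reverse.dropWhile PySem.Chars.isdigit with hw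
            have hw_ne : w ≠ [] := by
              intro hnil
              have hall := (List.dropWhile_eq_nil_iff).mp (hw.symm.trans hnil)
              apply hu_dig
              simp only [PySem.Chars.strIsdigit, Bool.and_eq_true, List.all_eq_true]
              exact ⟨by simp [hu_ne], fun x hx => hall x (List.mem_reverse.mpr hx)⟩
            have hd_eq : d = w ++ '(' :: v.reverse := by
              rw [hdw, hrev, List.dropWhile_append,
                  if_neg (show ¬((u.reverse.dropWhile PySem.Chars.isdigit).isEmpty = true) from by
                    rw [List.isEmpty_iff]
                    exact fun hh => hw_ne (hw.trans hh)), ← hw]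
            have hd_ne : d ≠ [] := by rw [hd_eq]; simp
            have hd_head : d.head? ≠ some '(' := by
              rcases List.exists_cons_of_ne_nil hw_ne with ⟨b, bs, hb⟩
              rw [hd_eq, hb]
              simp only [List.cons_append, List.head?_cons, ne_eq, Option.some.injEq]
              intro hbc
              apply hunp
              rw [← hbc]
              exact List.mem_reverse.mp
                ((List.dropWhile_sublist _).mem (hw ▸ (hb.symm ▸ List.mem_cons_self)))
            have hprev : (s.length : Int) - 2 - ((0 : Nat) + ((t.length : Nat) : Int) - 1)
                = ((d.length : Nat) : Int) := by
              have htl : 1 ≤ t.length := List.length_pos_iff.mpr ht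
              push_cast; omega
            rw [if_neg ht, hprev,
                if_neg (show ¬(((d.length : Nat) : Int) = -1) from by omega),
                if_pos (show ¬((d.length : Nat) : Int) = 0 ∧
                    ¬PySem.List.pyGet? s (((d.length : Nat) : Int) - 1) = some '(' from
                  ⟨by have h1 : 1 ≤ d.length := List.length_pos_iff.mpr hd_ne; omega,
                   by rw [hget_head hd_ne]; exact hd_head⟩)]
      · -- no '(' anywhere in body: rfind = -1, tail = the whole body
        have hrf : PySem.Chars.rfind body ['('] = -1 := rfind_not_mem body '(' hpar
        have htail : PySem.List.slice body (some (PySem.Chars.rfind body ['('] + 1)) none = body := by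
          rw [hrf, show ((-1 : Int) + 1) = ((0 : Nat) : Int) from by ring,
              PySem.List.slice_from_natCast, List.drop_zero]
        have hd_head : d.head? ≠ some '(' := by
          intro hh
          exact hpar (List.mem_reverse.mp
            ((List.dropWhile_sublist _).mem (List.mem_of_mem_head? (hdw ▸ hh))))
        rw [htail]
        by_cases hb_dig : PySem.Chars.strIsdigit body = true
        · -- success in both: the whole body is the run, starting at index 0
          have hb_ne : body ≠ [] := by
            intro h; rw [h] at hb_dig; simp [PySem.Chars.strIsdigit] at hb_dig
          have hb_all : ∀ x ∈ body, PySem.Chars.isdigit x := by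
            intro x hx
            simp only [PySem.Chars.strIsdigit, Bool.and_eq_true, List.all_eq_true] at hb_dig
            exact hb_dig.2 x hx
          have hd_nil : d = [] := by
            rw [hdw]
            exact List.dropWhile_eq_nil_iff.mpr
              (fun x hx => hb_all x (List.mem_reverse.mp hx))
          have ht_eq : t = body.reverse := by
            have h := htd
            rw [hd_nil, List.append_nil] at h
            exact h
          have ht_ne : t ≠ [] := by rw [ht_eq]; simp [hb_ne]
          have hprev : (s.length : Int) - 2 - ((0 : Nat) + ((t.length : Nat) : Int) - 1)
              = ((d.length : Nat) : Int) := by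
            have htl : 1 ≤ t.length := List.length_pos_iff.mpr ht_ne
            push_cast; omega
          have hAdig : PySem.List.slice s (some ((d.length : Nat) : Int)) (some (-1)) = body := by
            rw [slice_natCast_neg_one s d.length (by omega), ← hbody, hd_nil]
            simp
          rw [if_neg ht_ne, hprev,
              if_neg (show ¬(((d.length : Nat) : Int) = -1) from by omega),
              if_neg (show ¬(¬((d.length : Nat) : Int) = 0 ∧
                  ¬PySem.List.pyGet? s (((d.length : Nat) : Int) - 1) = some '(') from by
                rw [hd_nil]
                simp),
              if_neg (show ¬¬(PySem.Chars.strIsdigit body = true) from not_not_intro hb_dig),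
              hrf, if_pos rfl,
              hApre, hAdig, hd_nil]
          simp
        · -- B returns the default; A has no run or a run preceded by a non-'(' character
          rw [if_pos (show ¬(PySem.Chars.strIsdigit body = true) from hb_dig)]
          by_cases ht : t = []
          · rw [if_pos ht, if_pos rfl]
          · have hd_ne : d ≠ [] := by
              intro hnil
              apply hb_dig
              have hall := (List.dropWhile_eq_nil_iff).mp (hdw.symm.trans hnil)
              have hb_ne : body ≠ [] := by
                intro h
                rw [htw, h] at ht
                simp at ht
              simp only [PySem.Chars.strIsdigit, Bool.and_eq_true, List.all_eq_true]
              exact ⟨by simp [hb_ne], fun x hx => hall x (List.mem_reverse.mpr hx)⟩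
            have hprev : (s.length : Int) - 2 - ((0 : Nat) + ((t.length : Nat) : Int) - 1)
                = ((d.length : Nat) : Int) := by
              have htl : 1 ≤ t.length := List.length_pos_iff.mpr ht
              push_cast; omega
            rw [if_neg ht, hprev,
                if_neg (show ¬(((d.length : Nat) : Int) = -1) from by omega),
                if_pos (show ¬((d.length : Nat) : Int) = 0 ∧
                    ¬PySem.List.pyGet? s (((d.length : Nat) : Int) - 1) = some '(' from
                  ⟨by have h1 : 1 ≤ d.length := List.length_pos_iff.mpr hd_ne; omega,
                   by rw [hget_head hd_ne]; exact hd_head⟩)]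
    · have hnend : ¬ PySem.Chars.endswith s [')'] = true := by
        intro h
        have h2 := (PySem.Chars.endswith_iff s [')']).mp h
        rw [suffix_singleton_iff, List.getLast?_eq_some_getLast hne] at h2
        exact hlast (Option.some_injective _ h2)
      rw [if_neg (by omega), if_pos (by rw [hslast]; simp [hlast]), if_pos (Or.inr hnend)]

-- ===== VERDICT (by name: the statement is the Claim_ definition above) =====
theorem getAlteredName_spec : Claim_equal_getAlteredName := by
  intro originalName _
  exact getAlteredName_eq_alt originalName
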